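-- pv_equiv track=rewrite | github.com/GitGuardian/ggtools | team-mapping-gitlab-gitguardian/sync_gitlab.py | get_gitlab_projects_per_group
-- ===== SOURCE A (Python) =====
-- from typing import Iterable, TypedDict
--
-- GitlabProject = TypedDict(
--     "GitlabProject", {"name": str, "group": str, "fullPath": str, "id": str}
-- )
--
-- def get_gitlab_projects_per_group(
--     gitlab_projects: Iterable[GitlabProject],
-- ) -> dict[str, list[GitlabProject]]:
--     """
--     Transform a list of project into a map of group name to projects
--     """
--
--     projects_per_group: dict[str, list[GitlabProject]] = dict()
--
--     for project in gitlab_projects: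
--         if project["group"] not in projects_per_group:
--             projects_per_group[project["group"]] = []
--         projects_per_group[project["group"]].append(project)
--
--     return projects_per_group
-- ===== SOURCE B (Python) =====
-- def get_gitlab_projects_per_group(gitlab_projects):
--     """
--     Transform a list of project into a map of group name to projects.
--     Alternative decomposition: collect the group names in first-appearance
--     order, then build each group's project list with one filter pass.
--     """
--     projects = list(gitlab_projects)
--     order = []
--     for p in projects:
--         g = p["group"]
--         if g not in order:
--             order.append(g)
--     return {g: [p for p in projects if p["group"] == g] for g in order}
-- ===== Notes on version B (the rewrite author's own statement) =====
-- stated objective: alternative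
-- what changed: Replaces the incremental dict-of-append-lists build with a two-phase decomposition: first collect group names in first-appearance order, then build each group's list by filtering the input once per group.
import Mathlib
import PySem

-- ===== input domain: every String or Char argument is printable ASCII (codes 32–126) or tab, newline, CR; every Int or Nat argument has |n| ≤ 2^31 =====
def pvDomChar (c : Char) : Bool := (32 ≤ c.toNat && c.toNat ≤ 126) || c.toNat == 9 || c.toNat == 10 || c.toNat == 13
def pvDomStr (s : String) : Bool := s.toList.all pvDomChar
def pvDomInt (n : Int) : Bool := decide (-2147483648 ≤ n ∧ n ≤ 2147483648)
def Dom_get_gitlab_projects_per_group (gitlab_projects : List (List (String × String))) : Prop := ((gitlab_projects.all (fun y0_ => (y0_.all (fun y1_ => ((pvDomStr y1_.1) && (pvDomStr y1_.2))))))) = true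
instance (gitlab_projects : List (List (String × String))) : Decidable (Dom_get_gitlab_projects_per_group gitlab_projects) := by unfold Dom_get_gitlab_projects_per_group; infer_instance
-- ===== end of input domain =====

-- B groups in two phases (group names in first-appearance order, then one filter pass per group)
-- instead of A's incremental dict of appended lists; same return value, neither mutates its input.

-- project["group"]: lookup in the project dict (Pre_ guarantees the key is present)
def pvGroup (project : List (String × String)) : String :=
  (PySem.Dict.ofList project).getD "group" ""

-- ===== PORT A =====
def get_gitlab_projects_per_group (gitlab_projects : List (List (String × String))) : List (String × List (List (String × String))) :=
  (gitlab_projects.foldl (fun projects_per_group project =>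
      let d := if projects_per_group.contains (pvGroup project) then projects_per_group
               else projects_per_group.insert (pvGroup project) []
      d.modify (pvGroup project) [] (· ++ [project]))
    PySem.Dict.empty).items

-- ===== PORT B =====
def get_gitlab_projects_per_group_alt (gitlab_projects : List (List (String × String))) : List (String × List (List (String × String))) :=
  let order := gitlab_projects.foldl (fun order p =>
      if order.contains (pvGroup p) then order else order ++ [pvGroup p]) []
  order.map (fun g => (g, gitlab_projects.filter (fun p => pvGroup p == g)))

-- ===== PRECONDITION & SPEC =====
-- Pre_ excludes exactly the inputs containing a project without a "group" key, on which Python A raises KeyError.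
def Pre_get_gitlab_projects_per_group (gitlab_projects : List (List (String × String))) : Prop :=
  ∀ p ∈ gitlab_projects, (PySem.Dict.ofList p).contains "group" = true
instance (gitlab_projects : List (List (String × String))) : Decidable (Pre_get_gitlab_projects_per_group gitlab_projects) := by unfold Pre_get_gitlab_projects_per_group; infer_instance
def pvWitness_get_gitlab_projects_per_group : (List (List (String × String))) :=
  [[("name", "a"), ("group", "g1")], [("name", "b"), ("group", "g2")], [("name", "c"), ("group", "g1")]]

def Spec_get_gitlab_projects_per_group (gitlab_projects : List (List (String × String))) (out : List (String × List (List (String × String)))) : Prop := out = get_gitlab_projects_per_group_alt gitlab_projects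
instance (gitlab_projects : List (List (String × String))) (out : List (String × List (List (String × String)))) : Decidable (Spec_get_gitlab_projects_per_group gitlab_projects out) := by unfold Spec_get_gitlab_projects_per_group; infer_instance

-- ===== CLAIM (what is proved, stated in full; the proofs are below) =====
def Claim_equal_get_gitlab_projects_per_group : Prop := ∀ (gitlab_projects : List (List (String × String))), Dom_get_gitlab_projects_per_group gitlab_projects → Pre_get_gitlab_projects_per_group gitlab_projects → Spec_get_gitlab_projects_per_group gitlab_projects (get_gitlab_projects_per_group gitlab_projects)

-- ===== LEMMAS AND PROOFS =====

-- A's conditional-insert-then-append step is a single modify.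
theorem pvStepA_eq_modify (d : PySem.Dict String (List (List (String × String)))) (p : List (String × String)) :
    (if d.contains (pvGroup p) then d else d.insert (pvGroup p) []).modify (pvGroup p) [] (· ++ [p])
      = d.modify (pvGroup p) [] (· ++ [p]) := by
  by_cases h : d.contains (pvGroup p) = true
  · simp [h]
  · simp only [h, if_neg, Bool.not_eq_true, PySem.Dict.modify]
    rw [PySem.Dict.getD_insert_self, PySem.Dict.insert_insert_self,
        PySem.Dict.getD_of_not_contains _ _ (by simpa using h)]

theorem get_gitlab_projects_per_group_spec : Claim_equal_get_gitlab_projects_per_group := by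
  intro ps _ _
  unfold Spec_get_gitlab_projects_per_group get_gitlab_projects_per_group get_gitlab_projects_per_group_alt
  -- A's loop is a plain modify-loop over (group, project) pairs
  have hA : (fun (d : PySem.Dict String (List (List (String × String)))) project =>
        let d' := if d.contains (pvGroup project) then d else d.insert (pvGroup project) []
        d'.modify (pvGroup project) [] (· ++ [project]))
      = (fun d project => d.modify (pvGroup project) [] (· ++ [project])) := by
    funext d p; exact pvStepA_eq_modify d p
  rw [hA]
  -- B's accumulator is PySem.Set.ofList of the group names
  have hB : (fun (order : List String) p =>
        if order.contains (pvGroup p) then order else order ++ [pvGroup p])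
      = (fun order p => PySem.Set.add order (pvGroup p)) := rfl
  rw [hB]
  have horder : ps.foldl (fun order p => PySem.Set.add order (pvGroup p)) []
      = PySem.Set.ofList (ps.map pvGroup) := by
    rw [PySem.Set.ofList, List.foldl_map]; rfl
  rw [horder]
  -- reshape A's fold to the (key, value)-pair form of the library lemmas
  have hpair : ps.foldl (fun d project => d.modify (pvGroup project) [] (· ++ [project])) PySem.Dict.empty
      = (ps.map (fun p => (pvGroup p, p))).foldl
          (fun d q => d.modify q.1 [] (· ++ [q.2])) PySem.Dict.empty := by
    rw [List.foldl_map]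
  rw [hpair]
  have hnd : ((ps.map (fun p => (pvGroup p, p))).foldl
      (fun d q => d.modify q.1 [] (· ++ [q.2])) PySem.Dict.empty).keys.Nodup :=
    PySem.Dict.nodup_keys_foldl_modify_key (ps.map (fun p => (pvGroup p, p)))
      (fun q : String × List (String × String) => q.1) []
      (fun _ q v => v ++ [q.2]) PySem.Dict.empty PySem.Dict.nodup_keys_empty
  rw [PySem.Dict.items_eq_map_keys _ hnd []]
  rw [PySem.Dict.keys_foldl_modify_key (ps.map (fun p => (pvGroup p, p)))
      (fun q : String × List (String × String) => q.1) []
      (fun _ q v => v ++ [q.2]) PySem.Dict.empty]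
  have hkeys : (ps.map (fun p => (pvGroup p, p))).map (·.1) = ps.map pvGroup := by
    simp
  rw [show PySem.Dict.empty.keys = ([] : List String) from rfl, PySem.Set.update_nil_left, hkeys]
  apply List.map_congr_left
  intro g _
  rw [PySem.Dict.getD_foldl_modify_append]
  simp [List.filter_map, Function.comp_def]
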